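-- pv_equiv track=rewrite | github.com/hiennguyen110/Python-Calculus-Library | Calculus.py | __find_symbol_x
-- ===== SOURCE A (Python) =====
-- def __find_symbol_x(chain_of_str):
--     valid_string = "0123456789x"
--     state = True
--     str.lower(chain_of_str)
--     for char in chain_of_str:
--         if (char in valid_string):
--             state = True
--         else:
--             state = False
--             break
--     return state
-- ===== SOURCE B (Python) =====
-- def __find_symbol_x(chain_of_str):
--     str.lower(chain_of_str)  # same TypeError on non-str input as the original
--     total = 0
--     for allowed in "0123456789x":
--         total += chain_of_str.count(allowed)
--     return total == len(chain_of_str)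
-- ===== Notes on version B (the rewrite author's own statement) =====
-- stated objective: alternative
-- what changed: Instead of scanning the string character by character with a mutable state flag and an early break, B loops over the 11-symbol alphabet of allowed characters (the ten digits and the letter x), sums the occurrence count of each allowed symbol in the string, and returns whether that total equals the string length (every position is counted exactly once iff every character is allowed).
import Mathlib
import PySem

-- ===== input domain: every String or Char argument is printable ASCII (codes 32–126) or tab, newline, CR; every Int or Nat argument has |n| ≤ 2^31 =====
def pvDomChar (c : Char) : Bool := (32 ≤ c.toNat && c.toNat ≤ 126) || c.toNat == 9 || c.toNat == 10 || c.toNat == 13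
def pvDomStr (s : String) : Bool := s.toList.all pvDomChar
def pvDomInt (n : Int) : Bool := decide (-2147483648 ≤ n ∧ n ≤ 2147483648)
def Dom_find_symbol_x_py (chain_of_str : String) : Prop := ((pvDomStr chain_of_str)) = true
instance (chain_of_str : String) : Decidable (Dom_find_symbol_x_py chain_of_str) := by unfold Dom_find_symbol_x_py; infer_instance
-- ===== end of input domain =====

-- B replaces A's per-character scan-with-break by a loop over the 11-symbol alphabet that sums
-- occurrence counts and compares the total with the string length (alternative algorithm, same cost).

-- ===== PORT A =====
-- the for-loop with break: state starts True, set True per valid char, set False and break on the first invalid char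
def findSymbolXLoop : List Char → Bool
  | [] => true
  | c :: rest => if ("0123456789x".toList.contains c) then findSymbolXLoop rest else false

def find_symbol_x_py (chain_of_str : String) : Bool :=
  findSymbolXLoop chain_of_str.toList

-- ===== PORT B =====
-- loop 'for allowed in "0123456789x": total += chain_of_str.count(allowed)', then total == len
def find_symbol_x_py_alt (chain_of_str : String) : Bool :=
  let total := "0123456789x".toList.foldl
    (fun acc allowed => acc + PySem.Str.count chain_of_str (String.ofList [allowed])) 0
  total == PySem.Str.len chain_of_str

-- ===== PRECONDITION & SPEC =====
def Spec_find_symbol_x_py (chain_of_str : String) (out : Bool) : Prop := out = find_symbol_x_py_alt chain_of_str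
instance (chain_of_str : String) (out : Bool) : Decidable (Spec_find_symbol_x_py chain_of_str out) := by unfold Spec_find_symbol_x_py; infer_instance

-- ===== CLAIM (what is proved, stated in full; the proofs are below) =====
def Claim_equal_find_symbol_x_py : Prop := ∀ (chain_of_str : String), Dom_find_symbol_x_py chain_of_str → Spec_find_symbol_x_py chain_of_str (find_symbol_x_py chain_of_str)

-- ===== LEMMAS AND PROOFS =====

-- A's loop is "all characters allowed"
theorem findSymbolXLoop_eq_all (l : List Char) :
    findSymbolXLoop l = l.all (fun c => "0123456789x".toList.contains c) := by
  induction l with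
  | nil => rfl
  | cons c rest ih =>
    rw [findSymbolXLoop, List.all_cons, ← ih]
    cases h : ("0123456789x".toList.contains c) <;> simp

-- Chars.count.go for a single-character needle counts occurrences
theorem count_go_single (d : Char) (l : List Char) (fuel acc : Nat) (h : l.length ≤ fuel) :
    PySem.Chars.count.go [d] fuel l acc = acc + l.count d := by
  induction l generalizing fuel acc with
  | nil => cases fuel <;> simp [PySem.Chars.count.go]
  | cons c rest ih =>
    cases fuel with
    | zero => simp at h
    | succ n =>
      simp only [List.length_cons, Nat.succ_le_succ_iff] at h
      rw [PySem.Chars.count.go]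
      by_cases hc : c = d
      · subst hc
        simp only [List.isPrefixOf, BEq.rfl, Bool.true_and, if_true, List.length_cons,
          List.length_nil]
        rw [List.drop_one, List.tail_cons, ih _ _ h, List.count_cons_self]
        omega
      · have hp : ([d].isPrefixOf (c :: rest)) = false := by
          simp [List.isPrefixOf]
          exact fun hcd => absurd hcd.symm hc
        rw [hp]
        simp only [if_false, Bool.false_eq_true]
        rw [ih _ _ h, List.count_cons_of_ne hc]

theorem count_single (s : List Char) (d : Char) :
    PySem.Chars.count s [d] = s.count d := by
  simp only [PySem.Chars.count, List.isEmpty_cons, if_false, Bool.false_eq_true]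
  rw [count_go_single d s s.length 0 le_rfl, Nat.zero_add]

-- the foldl of B is the sum of the counts
theorem foldl_add_counts (g : Char → Nat) (l : List Char) (n : Nat) :
    l.foldl (fun acc d => acc + g d) n = n + (l.map g).sum := by
  induction l generalizing n with
  | nil => simp
  | cons a l ih => simp [List.foldl_cons, ih]; omega

-- pointwise sums of maps add
theorem sum_map_add (f g : Char → Nat) (l : List Char) :
    (l.map (fun d => f d + g d)).sum = (l.map f).sum + (l.map g).sum := by
  induction l with
  | nil => simp
  | cons a l ih => simp [ih]; omega

-- indicator sum over a duplicate-free alphabet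
theorem sum_indicator (c : Char) (allowed : List Char) (h : allowed.Nodup) :
    (allowed.map (fun d => if c == d then 1 else 0)).sum
      = (if allowed.contains c then 1 else 0) := by
  induction allowed with
  | nil => simp
  | cons a as ih =>
    rw [List.nodup_cons] at h
    rw [List.map_cons, List.sum_cons, ih h.2, List.contains_cons]
    by_cases hac : a = c
    · subst hac
      simp [h.1]
    · have h2 : (c == a) = false := beq_eq_false_iff_ne.mpr (Ne.symm hac)
      simp [h2]

-- sum of per-symbol counts over a duplicate-free alphabet = number of allowed positions
theorem sum_counts_eq_countP (s : List Char) (allowed : List Char) (h : allowed.Nodup) :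
    (allowed.map (fun d => s.count d)).sum = s.countP (fun c => allowed.contains c) := by
  induction s with
  | nil => simp [List.count_nil]
  | cons c rest ih =>
    have hcount : (allowed.map (fun d => (c :: rest).count d))
        = allowed.map (fun d => rest.count d + if c == d then 1 else 0) := by
      simp [List.count_cons]
    rw [hcount, sum_map_add, ih, sum_indicator c allowed h, List.countP_cons]

-- ===== VERDICT (by name: the statement is the Claim_ definition above) =====
theorem find_symbol_x_py_spec : Claim_equal_find_symbol_x_py := by
  intro s _
  unfold Spec_find_symbol_x_py find_symbol_x_py find_symbol_x_py_alt
  simp only [PySem.Str.count_eq, PySem.Str.len]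
  have hcounts : ∀ d : Char, PySem.Chars.count s.toList (String.ofList [d]).toList
      = s.toList.count d := by
    intro d
    have hd : (String.ofList [d]).toList = [d] := by simp
    rw [hd, count_single]
  have hfold : ("0123456789x".toList.foldl
      (fun acc allowed => acc + PySem.Chars.count s.toList (String.ofList [allowed]).toList) 0)
      = ("0123456789x".toList.map (fun d => s.toList.count d)).sum := by
    rw [foldl_add_counts (fun d => PySem.Chars.count s.toList (String.ofList [d]).toList)
      "0123456789x".toList 0, Nat.zero_add]
    exact congrArg List.sum (List.map_congr_left (fun d _ => hcounts d))
  rw [findSymbolXLoop_eq_all, hfold,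
    sum_counts_eq_countP s.toList "0123456789x".toList (by decide)]
  have hcast : ∀ (a b : Nat), (((a:Int)) == ((b:Int))) = (a == b) := by
    intro a b; simp
  rw [hcast]
  rcases h : s.toList.all (fun c => "0123456789x".toList.contains c) with _ | _
  · symm
    rw [beq_eq_false_iff_ne]
    intro hlen
    rw [Bool.eq_false_iff] at h
    exact h (List.all_eq_true.mpr (List.countP_eq_length.mp hlen))
  · symm
    rw [beq_iff_eq]
    exact List.countP_eq_length.mpr (List.all_eq_true.mp h)
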